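-- pv_equiv track=rewrite | github.com/braught2/GraphGeneration | generateGraph-new-python.py | extract_all_modes
-- ===== SOURCE A (Python) =====
-- import itertools
--
-- def extract_all_modes(mode_kw_dict):
--     all_lists = []
--     for key in mode_kw_dict:
--         one_list = []
--         for kw in mode_kw_dict[key]:
--             one_list.append(kw)
--         all_lists.append(one_list)
--     res = list(itertools.product(*all_lists))
--     tmp = []
--     for mode_tuple in res:
--         mode_str = ""
--         for kw in mode_tuple:
--             mode_str = mode_str + kw + ";"
--         if mode_str!="" and mode_str[-1]==";":
--             mode_str = mode_str[:-1]
--         tmp.append(mode_str)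
--     return tmp
-- ===== SOURCE B (Python) =====
-- def extract_all_modes(mode_kw_dict):
--     vals = list(mode_kw_dict.values())
--     if not vals:
--         return [""]
--     res = list(vals[0])
--     for lst in vals[1:]:
--         res = [prefix + ";" + kw for prefix in res for kw in lst]
--     return res
-- ===== Notes on version B (the rewrite author's own statement) =====
-- stated objective: simpler
-- what changed: Replaces itertools.product over collected tuples plus a per-tuple join-and-strip pass with an incremental fold that extends the semicolon-joined strings one keyword list at a time.
import Mathlib
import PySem

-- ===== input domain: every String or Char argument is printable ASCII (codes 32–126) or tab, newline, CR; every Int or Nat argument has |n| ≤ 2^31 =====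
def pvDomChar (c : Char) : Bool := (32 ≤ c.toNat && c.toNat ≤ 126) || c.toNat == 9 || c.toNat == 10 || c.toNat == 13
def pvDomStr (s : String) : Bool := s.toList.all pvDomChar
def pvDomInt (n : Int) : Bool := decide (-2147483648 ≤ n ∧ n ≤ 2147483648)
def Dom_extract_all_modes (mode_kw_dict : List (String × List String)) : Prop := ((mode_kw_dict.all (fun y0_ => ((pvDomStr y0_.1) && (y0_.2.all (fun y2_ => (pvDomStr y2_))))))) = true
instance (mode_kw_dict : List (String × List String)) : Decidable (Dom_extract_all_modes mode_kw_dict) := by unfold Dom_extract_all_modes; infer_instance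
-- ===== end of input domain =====

-- B builds the semicolon-joined strings by folding over the keyword lists instead of materialising
-- itertools.product tuples and join-stripping each; same values, simpler shape (objective: simpler).

-- ===== PORT A =====
-- itertools.product(*lists): hand-ported (not in PySem), rightmost factor varies fastest, product of [] is [[]]
def pvProduct (ls : List (List String)) : List (List String) :=
  match ls with
  | [] => [[]]
  | l :: ls => l.flatMap (fun x => (pvProduct ls).map (fun t => x :: t))

-- 'for key in mode_kw_dict: … mode_kw_dict[key]' visits each key once and looks up its value:
-- ported as iteration over the assoc pairs, exact for Python dicts (keys are distinct).
def extract_all_modes (mode_kw_dict : List (String × List String)) : List String :=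
  let all_lists := mode_kw_dict.foldl
    (fun acc p => acc ++ [p.2.foldl (fun one_list kw => one_list ++ [kw]) []]) []
  let res := pvProduct all_lists
  res.foldl (fun tmp mode_tuple =>
    let mode_str := mode_tuple.foldl (fun s kw => s ++ kw ++ ";") ""
    let mode_str :=
      if mode_str ≠ "" ∧ PySem.Str.pyGet? mode_str (-1) = some ';' then
        PySem.Str.slice mode_str none (some (-1))
      else mode_str
    tmp ++ [mode_str]) []

-- ===== PORT B =====
def extract_all_modes_alt (mode_kw_dict : List (String × List String)) : List String :=
  match mode_kw_dict.map Prod.snd with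
  | [] => [""]
  | v :: rest =>
    rest.foldl (fun res lst => res.flatMap (fun pre => lst.map (fun kw => pre ++ ";" ++ kw))) v

-- ===== PRECONDITION & SPEC =====
def Spec_extract_all_modes (mode_kw_dict : List (String × List String)) (out : List String) : Prop := out = extract_all_modes_alt mode_kw_dict
instance (mode_kw_dict : List (String × List String)) (out : List String) : Decidable (Spec_extract_all_modes mode_kw_dict out) := by unfold Spec_extract_all_modes; infer_instance

-- ===== CLAIM (what is proved, stated in full; the proofs are below) =====
def Claim_equal_extract_all_modes : Prop := ∀ (mode_kw_dict : List (String × List String)), Dom_extract_all_modes mode_kw_dict → Spec_extract_all_modes mode_kw_dict (extract_all_modes mode_kw_dict)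


-- ===== LEMMAS AND PROOFS =====

-- concatenation of a list of strings (proof-side helper)
def pvJoin : List String → String
  | [] => ""
  | s :: r => s ++ pvJoin r

-- ";"-prefixed join of a tuple's tail
def pvJ (t : List String) : String := pvJoin (t.map (fun s => ";" ++ s))

theorem pvJ_cons (x : String) (t : List String) : pvJ (x :: t) = ";" ++ x ++ pvJ t := by
  simp [pvJ, pvJoin, String.append_assoc]

-- A's inner build loop
theorem build_eq (t : List String) (s : String) :
    t.foldl (fun s kw => s ++ kw ++ ";") s = s ++ pvJoin (t.map (fun kw => kw ++ ";")) := by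
  induction t generalizing s with
  | nil => simp [pvJoin]
  | cons a t ih =>
    rw [List.foldl_cons, ih]
    simp [pvJoin, String.append_assoc]

theorem join_semis (x : String) (t : List String) :
    pvJoin ((x :: t).map (fun kw => kw ++ ";")) = x ++ pvJ t ++ ";" := by
  induction t generalizing x with
  | nil => simp [pvJoin, pvJ]
  | cons a t ih =>
    have h := ih a
    simp only [List.map, pvJoin] at h ⊢
    rw [h, pvJ_cons]
    simp [String.append_assoc]

-- A's per-tuple string on a nonempty tuple
theorem stripA_cons (x : String) (t : List String) :
    (let mode_str := (x :: t).foldl (fun s kw => s ++ kw ++ ";") ""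
     if mode_str ≠ "" ∧ PySem.Str.pyGet? mode_str (-1) = some ';' then
       PySem.Str.slice mode_str none (some (-1))
     else mode_str) = x ++ pvJ t := by
  show (if _ then _ else _) = _
  rw [build_eq, join_semis]
  have hlist : ("" ++ (x ++ pvJ t ++ ";")).toList = (x ++ pvJ t).toList ++ [';'] := by
    simp [String.toList_append]
  have hne : ("" ++ (x ++ pvJ t ++ ";")) ≠ "" := by
    intro h
    have := congrArg String.toList h
    rw [hlist] at this
    simp at this
  have hget : PySem.Str.pyGet? ("" ++ (x ++ pvJ t ++ ";")) (-1) = some ';' := by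
    rw [PySem.Str.pyGet?_eq, PySem.Chars.pyGet?_eq_listPyGet?, hlist]
    simp [PySem.List.pyGet?_neg_one]
  rw [if_pos ⟨hne, hget⟩]
  apply String.ext_iff.mpr
  rw [PySem.Str.toList_slice, PySem.Chars.slice_eq_listSlice, PySem.List.slice_to_neg_one, hlist]
  simp

-- B's fold characterised by pvProduct
theorem foldB_eq (ls : List (List String)) (res : List String) :
    ls.foldl (fun res lst => res.flatMap (fun p => lst.map (fun kw => p ++ ";" ++ kw))) res
      = res.flatMap (fun p => (pvProduct ls).map (fun t => p ++ pvJ t)) := by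
  induction ls generalizing res with
  | nil => simp [pvProduct, pvJ, pvJoin]
  | cons lst ls ih =>
    rw [List.foldl_cons, ih, List.flatMap_assoc]
    apply List.flatMap_congr
    intro p _
    rw [List.flatMap_map]
    simp only [pvProduct, List.map_flatMap, List.map_map]
    apply List.flatMap_congr
    intro kw _
    apply List.map_congr_left
    intro t _
    simp [pvJ_cons, String.append_assoc]

theorem extract_all_modes_eq (d : List (String × List String)) :
    extract_all_modes d = extract_all_modes_alt d := by
  unfold extract_all_modes
  have hinner : ∀ v : List String,
      v.foldl (fun one_list kw => one_list ++ [kw]) ([] : List String) = v := by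
    intro v; simpa using PySem.List.foldl_append_singleton v []
  have hcollect : d.foldl
      (fun acc p => acc ++ [p.2.foldl (fun one_list kw => one_list ++ [kw]) []]) []
      = d.map Prod.snd := by
    rw [PySem.List.foldl_append_singleton_eq_map]
    simp [hinner]
  rw [hcollect]
  rw [PySem.List.foldl_append_singleton_eq_map]
  cases hd : d.map Prod.snd with
  | nil => simp [extract_all_modes_alt, hd, pvProduct]
  | cons v rest =>
    have halt : extract_all_modes_alt d
        = rest.foldl (fun res lst => res.flatMap (fun pre => lst.map (fun kw => pre ++ ";" ++ kw))) v := by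
      unfold extract_all_modes_alt
      rw [hd]
    rw [halt, foldB_eq]
    simp only [pvProduct, List.map_flatMap, List.map_map]
    apply List.flatMap_congr
    intro x _
    apply List.map_congr_left
    intro t _
    simpa using stripA_cons x t

-- ===== VERDICT (by name: the statement is the Claim_ definition above) =====
theorem extract_all_modes_spec : Claim_equal_extract_all_modes := by
  intro d _
  unfold Spec_extract_all_modes
  exact extract_all_modes_eq d
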